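-- pv_equiv track=rewrite | github.com/KeerZhou/Covid-19-Tracking | covid19_analyze/code/VA_Polyfit_Optimize.py | qselect
-- ===== SOURCE A (Python) =====
-- def qselect(ary_list, k):
--     if len(ary_list) < k:
--         return ary_list
--
--     tmp = ary_list[0]
--     left = [x for x in ary_list[1:] if x <= tmp] + [tmp]
--     llen = len(left)
--     if llen == k:
--         return left
--     if llen > k:
--         return qselect(left, k)
--     else:
--         right = [x for x in ary_list[1:] if x > tmp]
--         return left + qselect(right, k-llen)
--     pass
-- ===== SOURCE B (Python) =====
-- def qselect(ary_list, k):
--     # Iterative quickselect: explicit loop with a prefix accumulator and a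
--     # single-pass partition, instead of A's recursion with two filter passes.
--     prefix = []
--     cur = ary_list
--     while len(cur) >= k:
--         tmp = cur[0]
--         lo, hi = [], []
--         for x in cur[1:]:
--             (lo if x <= tmp else hi).append(x)
--         lo.append(tmp)
--         if len(lo) == k:
--             return prefix + lo
--         if len(lo) > k:
--             cur = lo
--         else:
--             prefix.extend(lo)
--             cur = hi
--             k -= len(lo)
--     return prefix + cur
-- ===== Notes on version B (the rewrite author's own statement) =====
-- stated objective: alternative
-- what changed: Replaced A's quickselect recursion (two list-comprehension filter passes, non-tail call prepending `left`) by an explicit while-loop that carries a prefix accumulator and partitions the tail in a single pass into lo/hi.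
import Mathlib
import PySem

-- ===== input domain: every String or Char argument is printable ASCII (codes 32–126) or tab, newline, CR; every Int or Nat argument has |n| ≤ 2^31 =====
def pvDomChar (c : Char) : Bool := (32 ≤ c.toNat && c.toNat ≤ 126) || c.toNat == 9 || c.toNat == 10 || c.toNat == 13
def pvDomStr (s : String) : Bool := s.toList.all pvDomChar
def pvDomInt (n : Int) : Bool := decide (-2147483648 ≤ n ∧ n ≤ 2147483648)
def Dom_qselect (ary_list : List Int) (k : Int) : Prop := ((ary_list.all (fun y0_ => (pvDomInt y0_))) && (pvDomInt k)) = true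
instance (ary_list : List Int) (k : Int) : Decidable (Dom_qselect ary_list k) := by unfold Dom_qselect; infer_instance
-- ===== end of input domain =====

-- B rewrites A's quickselect recursion as an explicit loop with a prefix accumulator and a
-- single-pass partition; same output, same cost (objective: alternative decomposition).

-- ===== PORT A =====
-- A's recursion diverges or raises on some inputs (see Pre_); fuel makes the Lean port
-- total, returning [] only on fuel exhaustion / the empty-list IndexError path, both
-- outside Pre_qselect. The same fuel bound is used by both ports (it is a totality
-- device, not part of either algorithm).
def qselectF : Nat → List Int → Int → List Int
  | 0, _, _ => []
  | fuel+1, ary_list, k =>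
    if (ary_list.length : Int) < k then ary_list
    else
      match ary_list with
      | [] => []   -- Python: ary_list[0] raises IndexError here (k ≤ 0); outside Pre_qselect
      | tmp :: rest =>
        let left := rest.filter (fun x => decide (x ≤ tmp)) ++ [tmp]
        let llen : Int := left.length
        if llen = k then left
        else if llen > k then qselectF fuel left k
        else left ++ qselectF fuel (rest.filter (fun x => decide (x > tmp))) (k - llen)

def qselect (ary_list : List Int) (k : Int) : List Int :=
  qselectF ((ary_list.length + 2) * (ary_list.length + 2)) ary_list k

-- ===== PORT B =====
-- the single 'for x in cur[1:]' pass appending into lo/hi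
def qselectPartition (tmp : Int) (xs : List Int) : List Int × List Int :=
  xs.foldl (fun acc x => if decide (x ≤ tmp) then (acc.1 ++ [x], acc.2) else (acc.1, acc.2 ++ [x])) ([], [])

def qselectLoop : Nat → List Int → List Int → Int → List Int
  | 0, pre, _, _ => pre
  | fuel+1, pre, cur, k =>
    if (cur.length : Int) < k then pre ++ cur
    else
      match cur with
      | [] => pre   -- Python: cur[0] raises IndexError here (k ≤ 0); outside Pre_qselect
      | tmp :: rest =>
        let p := qselectPartition tmp rest
        let lo := p.1 ++ [tmp]
        if (lo.length : Int) = k then pre ++ lo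
        else if (lo.length : Int) > k then qselectLoop fuel pre lo k
        else qselectLoop fuel (pre ++ lo) p.2 (k - lo.length)

def qselect_alt (ary_list : List Int) (k : Int) : List Int :=
  qselectLoop ((ary_list.length + 2) * (ary_list.length + 2)) [] ary_list k

-- ===== PRECONDITION & SPEC =====
-- Pre_ is exactly where the Python A returns normally: A raises IndexError when k ≤ 0 (on the
-- empty list) or recurses forever (RecursionError) when k ≤ 0 on a nonempty list or when the
-- k-th and (k+1)-th smallest elements are equal (the partition can then never split at k).
def Pre_qselect (ary_list : List Int) (k : Int) : Prop :=
  1 ≤ k ∧ (k < (ary_list.length : Int) →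
    PySem.List.pyGet? (PySem.List.sorted ary_list (fun x => x) false) (k - 1)
      ≠ PySem.List.pyGet? (PySem.List.sorted ary_list (fun x => x) false) k)
instance (ary_list : List Int) (k : Int) : Decidable (Pre_qselect ary_list k) := by
  unfold Pre_qselect; infer_instance
def pvWitness_qselect : List Int × Int := ([3, 1, 2, 5, 4], 2)

def Spec_qselect (ary_list : List Int) (k : Int) (out : List Int) : Prop := out = qselect_alt ary_list k
instance (ary_list : List Int) (k : Int) (out : List Int) : Decidable (Spec_qselect ary_list k out) := by unfold Spec_qselect; infer_instance

-- ===== CLAIM (what is proved, stated in full; the proofs are below) =====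
def Claim_equal_qselect : Prop := ∀ (ary_list : List Int) (k : Int), Dom_qselect ary_list k → Pre_qselect ary_list k → Spec_qselect ary_list k (qselect ary_list k)

-- ===== LEMMAS AND PROOFS =====
lemma qselectPartition_go (tmp : Int) :
    ∀ (xs lo hi : List Int),
      xs.foldl (fun acc x => if decide (x ≤ tmp) then (acc.1 ++ [x], acc.2) else (acc.1, acc.2 ++ [x])) (lo, hi)
        = (lo ++ xs.filter (fun x => decide (x ≤ tmp)), hi ++ xs.filter (fun x => decide (x > tmp))) := by
  intro xs
  induction xs with
  | nil => simp
  | cons x xs ih =>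
    intro lo hi
    rw [List.foldl_cons]
    split_ifs with hx
    · have hx2 : decide (x > tmp) = false := by simp_all
      rw [ih, List.filter_cons, List.filter_cons, hx, hx2]
      simp
    · have hx1 : decide (x ≤ tmp) = false := by simpa using hx
      have hx2 : decide (x > tmp) = true := by simp_all
      rw [ih, List.filter_cons, List.filter_cons, hx1, hx2]
      simp

lemma qselectPartition_spec (tmp : Int) (xs : List Int) :
    qselectPartition tmp xs
      = (xs.filter (fun x => decide (x ≤ tmp)), xs.filter (fun x => decide (x > tmp))) := by
  unfold qselectPartition
  rw [qselectPartition_go tmp xs [] []]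
  simp

lemma qselectLoop_eq (fuel : Nat) :
    ∀ (pre cur : List Int) (k : Int),
      qselectLoop fuel pre cur k = pre ++ qselectF fuel cur k := by
  induction fuel with
  | zero => intro pre cur k; simp [qselectLoop, qselectF]
  | succ f ih =>
    intro pre cur k
    cases cur with
    | nil => simp [qselectLoop, qselectF]
    | cons tmp rest =>
      simp only [qselectLoop, qselectF, qselectPartition_spec]
      split
      · simp
      · split
        · simp
        · split
          · exact ih ..
          · rw [ih]; simp

theorem qselect_eq_alt (ary_list : List Int) (k : Int) :
    qselect ary_list k = qselect_alt ary_list k := by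
  unfold qselect qselect_alt
  rw [qselectLoop_eq]
  simp

-- ===== VERDICT (by name: the statement is the Claim_ definition above) =====
theorem qselect_spec : Claim_equal_qselect := by
  intro ary_list k _ _
  unfold Spec_qselect
  exact qselect_eq_alt ary_list k
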